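-- pv_equiv track=rewrite | github.com/TortoiseWolfe/TurtleWolfe | scripts/project-status.py | get_terminal_counts
-- ===== SOURCE A (Python) =====
-- def get_terminal_counts(data):
--     """Count terminals by status"""
--     counts = {"active": 0, "idle": 0, "blocked": 0}
--
--     for terminal, info in data.get("terminals", {}).items():
--         status = info.get("status", "idle").lower()
--         if status == "idle":
--             counts["idle"] += 1
--         elif status == "blocked":
--             counts["blocked"] += 1
--         else:
--             counts["active"] += 1
--
--     return counts
-- ===== SOURCE B (Python) =====
-- def get_terminal_counts(data):
--     """Count terminals by status"""
--     statuses = [info.get("status", "idle").lower()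
--                 for info in data.get("terminals", {}).values()]
--     idle = statuses.count("idle")
--     blocked = statuses.count("blocked")
--     return {"active": len(statuses) - idle - blocked,
--             "idle": idle, "blocked": blocked}
-- ===== Notes on version B (the rewrite author's own statement) =====
-- stated objective: simpler
-- what changed: Replaces the if/elif/else increment loop over a mutable counts dict by collecting the normalized statuses in one comprehension and deriving the three counts arithmetically: idle and blocked via list.count, active = total - idle - blocked.
import Mathlib
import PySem

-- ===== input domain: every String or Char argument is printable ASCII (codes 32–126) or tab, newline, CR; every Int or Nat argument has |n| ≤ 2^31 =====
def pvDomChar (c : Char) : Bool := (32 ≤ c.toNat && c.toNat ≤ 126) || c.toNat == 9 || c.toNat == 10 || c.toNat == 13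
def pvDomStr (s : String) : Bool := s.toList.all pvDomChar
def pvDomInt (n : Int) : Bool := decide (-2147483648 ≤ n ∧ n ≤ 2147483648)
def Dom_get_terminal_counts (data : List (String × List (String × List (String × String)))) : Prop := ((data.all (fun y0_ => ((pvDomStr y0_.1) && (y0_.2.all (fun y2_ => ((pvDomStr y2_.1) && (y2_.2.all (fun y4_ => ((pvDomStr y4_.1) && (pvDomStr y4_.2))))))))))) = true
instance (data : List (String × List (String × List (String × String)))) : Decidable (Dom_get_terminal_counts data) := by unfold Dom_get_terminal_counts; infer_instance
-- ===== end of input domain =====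

-- B collects the normalized statuses once and derives the counts arithmetically (active = total - idle - blocked) instead of A's if/elif/else increments on a mutable dict.

-- ===== PORT A =====
def get_terminal_counts (data : List (String × List (String × List (String × String)))) : List (String × Int) :=
  let counts : PySem.Dict String Int :=
    ((PySem.Dict.empty.insert "active" 0).insert "idle" 0).insert "blocked" 0
  let terminals := (PySem.Dict.ofList data).getD "terminals" []
  let counts := (PySem.Dict.ofList terminals).items.foldl (fun c p =>
    let status := PySem.Str.lower ((PySem.Dict.ofList p.2).getD "status" "idle")
    if status == "idle" then c.modify "idle" 0 (· + 1)
    else if status == "blocked" then c.modify "blocked" 0 (· + 1)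
    else c.modify "active" 0 (· + 1)) counts
  counts.items

-- ===== PORT B =====
def get_terminal_counts_alt (data : List (String × List (String × List (String × String)))) : List (String × Int) :=
  let statuses := ((PySem.Dict.ofList ((PySem.Dict.ofList data).getD "terminals" [])).values).map
    (fun info => PySem.Str.lower ((PySem.Dict.ofList info).getD "status" "idle"))
  let idle : Int := statuses.count "idle"
  let blocked : Int := statuses.count "blocked"
  [("active", (statuses.length : Int) - idle - blocked), ("idle", idle), ("blocked", blocked)]

-- ===== PRECONDITION & SPEC =====
def Spec_get_terminal_counts (data : List (String × List (String × List (String × String)))) (out : List (String × Int)) : Prop := out = get_terminal_counts_alt data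
instance (data : List (String × List (String × List (String × String)))) (out : List (String × Int)) : Decidable (Spec_get_terminal_counts data out) := by unfold Spec_get_terminal_counts; infer_instance

-- ===== CLAIM (what is proved, stated in full; the proofs are below) =====
def Claim_equal_get_terminal_counts : Prop := ∀ (data : List (String × List (String × List (String × String)))), Dom_get_terminal_counts data → Spec_get_terminal_counts data (get_terminal_counts data)

-- ===== LEMMAS AND PROOFS =====

-- the 3-key state of A's counts dict
def pvMk3 (a i b : Int) : PySem.Dict String Int :=
  PySem.Dict.mk [("active", a), ("idle", i), ("blocked", b)]

theorem pvMk3_eq_inserts (a i b : Int) :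
    ((PySem.Dict.empty.insert "active" a).insert "idle" i).insert "blocked" b = pvMk3 a i b := by
  rfl

theorem pvModify_active (a i b : Int) :
    (pvMk3 a i b).modify "active" 0 (· + 1) = pvMk3 (a + 1) i b := rfl
theorem pvModify_idle (a i b : Int) :
    (pvMk3 a i b).modify "idle" 0 (· + 1) = pvMk3 a (i + 1) b := rfl
theorem pvModify_blocked (a i b : Int) :
    (pvMk3 a i b).modify "blocked" 0 (· + 1) = pvMk3 a i (b + 1) := rfl

theorem pvLoop (l : List (String × List (String × String))) (a i b : Int) :
    l.foldl (fun c p =>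
      if PySem.Str.lower ((PySem.Dict.ofList p.2).getD "status" "idle") == "idle" then c.modify "idle" 0 (· + 1)
      else if PySem.Str.lower ((PySem.Dict.ofList p.2).getD "status" "idle") == "blocked" then c.modify "blocked" 0 (· + 1)
      else c.modify "active" 0 (· + 1)) (pvMk3 a i b) =
    pvMk3
      (a + ((l.map (fun p => PySem.Str.lower ((PySem.Dict.ofList p.2).getD "status" "idle"))).length
        - (l.map (fun p => PySem.Str.lower ((PySem.Dict.ofList p.2).getD "status" "idle"))).count "idle"
        - (l.map (fun p => PySem.Str.lower ((PySem.Dict.ofList p.2).getD "status" "idle"))).count "blocked" : Int))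
      (i + ((l.map (fun p => PySem.Str.lower ((PySem.Dict.ofList p.2).getD "status" "idle"))).count "idle" : Int))
      (b + ((l.map (fun p => PySem.Str.lower ((PySem.Dict.ofList p.2).getD "status" "idle"))).count "blocked" : Int)) := by
  induction l generalizing a i b with
  | nil => simp
  | cons x xs ih =>
    simp only [List.foldl_cons, List.map_cons, List.count_cons, List.length_cons]
    by_cases hidle : PySem.Str.lower ((PySem.Dict.ofList x.2).getD "status" "idle") = "idle"
    · rw [if_pos (by simp [hidle]), pvModify_idle, ih]
      simp only [pvMk3, hidle, PySem.Dict.mk.injEq, List.cons.injEq, Prod.mk.injEq,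
        beq_self_eq_true, if_true, (by decide : ("idle" == "blocked") = false),
        and_true, true_and]
      push_cast
      omega
    · by_cases hbl : PySem.Str.lower ((PySem.Dict.ofList x.2).getD "status" "idle") = "blocked"
      · rw [if_neg (by simp [hidle]), if_pos (by simp [hbl]), pvModify_blocked, ih]
        simp only [pvMk3, hbl, PySem.Dict.mk.injEq, List.cons.injEq, Prod.mk.injEq,
          beq_self_eq_true, if_true, (by decide : ("blocked" == "idle") = false),
          and_true, true_and]
        push_cast
        omega
      · rw [if_neg (by simp [hidle]), if_neg (by simp [hbl]), pvModify_active, ih]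
        have h1 : (PySem.Str.lower ((PySem.Dict.ofList x.2).getD "status" "idle") == "idle") = false := by
          simp [hidle]
        have h2 : (PySem.Str.lower ((PySem.Dict.ofList x.2).getD "status" "idle") == "blocked") = false := by
          simp [hbl]
        simp only [pvMk3, h1, h2, PySem.Dict.mk.injEq, List.cons.injEq, Prod.mk.injEq,
          and_true, true_and]
        push_cast
        omega


-- ===== VERDICT (by name: the statement is the Claim_ definition above) =====
theorem get_terminal_counts_spec : Claim_equal_get_terminal_counts := by
  intro data _
  show get_terminal_counts data = get_terminal_counts_alt data
  unfold get_terminal_counts get_terminal_counts_alt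
  dsimp only
  rw [pvMk3_eq_inserts, pvLoop]
  simp only [pvMk3, PySem.Dict.values, List.map_map, Function.comp_def,
    List.length_map, zero_add]
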